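-- pv_equiv track=rewrite | github.com/Aishgadol/AI_LAB1 | sol.py | ulam_distance
-- ===== SOURCE A (Python) =====
-- def levenshtein_distance(str1, str2):
--     # get lengths of both strings
--     len_str1, len_str2 = len(str1), len(str2)
--     # create dp table for edit distances
--     dp = [[0] * (len_str2 + 1) for _ in range(len_str1 + 1)]
--     # initialize dp table for deletions (empty second string)
--     for i in range(len_str1 + 1):
--         dp[i][0] = i
--     # initialize dp table for insertions (empty first string)
--     for j in range(len_str2 + 1):
--         dp[0][j] = j
--     # fill dp table with min edit operations
--     for i in range(1, len_str1 + 1):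
--         for j in range(1, len_str2 + 1):
--             # cost is 0 if characters match, else 1
--             cost = 0 if str1[i - 1] == str2[j - 1] else 1
--             dp[i][j] = min(dp[i - 1][j] + 1, dp[i][j - 1] + 1, dp[i - 1][j - 1] + cost)
--     # return computed levenshtein distance
--     return dp[len_str1][len_str2]
--
-- def ulam_distance(s1, s2):
--     if len(s1) != len(s2):
--         raise ValueError("strings must be of equal length")
--
--     # Check if both strings have the same set of characters
--     if set(s1) != set(s2):
--         return levenshtein_distance(s1, s2), True  # Return the distance and signal fallback
--
--     #map each character in s2 to its index
--     index_map = {char: idx for idx, char in enumerate(s2)}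
--     #convert s1 into a list of indices based on s2's ordering
--     mapped_indices = [index_map[char] for char in s1]
--     #helper function to perform binary search for first index in lst that is >= value
--     def find_position(lst, value):
--         lo = 0
--         hi = len(lst)
--         while lo < hi:
--             mid = (lo + hi) // 2
--             if lst[mid] < value:
--                 lo = mid + 1
--             else:
--                 hi = mid
--         return lo
--     #initialize list to hold the tails of increasing subsequences
--     lis_tails = []
--     #compute the longest increasing subsequence using manual binary search
--     for num in mapped_indices:
--         pos = find_position(lis_tails, num)
--         if pos == len(lis_tails):
--             lis_tails.append(num)  #extend current subsequence
--         else: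
--             lis_tails[pos] = num   #replace element to maintain lowest tail
--     return len(s1) - len(lis_tails), False  # Return the distance and no fallback
-- ===== SOURCE B (Python) =====
-- def ulam_distance(s1, s2):
--     if len(s1) != len(s2):
--         raise ValueError("strings must be of equal length")
--
--     if set(s1) != set(s2):
--         # Levenshtein with a rolling row instead of a full table
--         prev = list(range(len(s2) + 1))
--         for i in range(1, len(s1) + 1):
--             cur = [i]
--             for j in range(1, len(s2) + 1):
--                 cost = 0 if s1[i - 1] == s2[j - 1] else 1
--                 cur.append(min(prev[j] + 1, cur[j - 1] + 1, prev[j - 1] + cost))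
--             prev = cur
--         return prev[len(s2)], True
--
--     index_map = {char: idx for idx, char in enumerate(s2)}
--     mapped_indices = [index_map[char] for char in s1]
--     # classic quadratic LIS dynamic program instead of patience sorting
--     dp = []
--     best = 0
--     for x in mapped_indices:
--         best_prev = 0
--         for j in range(len(dp)):
--             if mapped_indices[j] < x and dp[j] > best_prev:
--                 best_prev = dp[j]
--         d = best_prev + 1
--         dp.append(d)
--         if d > best:
--             best = d
--     return len(s1) - best, False
-- ===== Notes on version B (the rewrite author's own statement) =====
-- stated objective: simpler
-- what changed: The patience-sorting-plus-binary-search LIS is replaced by the classic quadratic LIS dynamic program (dp[i] = 1 + best smaller predecessor, answer = len - max dp), and the full-table Levenshtein fallback by a rolling two-row DP.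
import Mathlib
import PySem

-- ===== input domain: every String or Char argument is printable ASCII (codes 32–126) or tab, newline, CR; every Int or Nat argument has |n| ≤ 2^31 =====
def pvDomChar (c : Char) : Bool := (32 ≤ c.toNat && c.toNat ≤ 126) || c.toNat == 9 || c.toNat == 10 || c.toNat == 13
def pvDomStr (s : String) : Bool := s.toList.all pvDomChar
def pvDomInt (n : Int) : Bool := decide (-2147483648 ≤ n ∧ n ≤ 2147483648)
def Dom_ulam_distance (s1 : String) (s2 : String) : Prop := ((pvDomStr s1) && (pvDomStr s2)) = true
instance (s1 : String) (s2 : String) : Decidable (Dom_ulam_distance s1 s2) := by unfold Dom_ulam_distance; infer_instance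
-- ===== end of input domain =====

-- B replaces A's patience-sorting-plus-binary-search LIS with the classic quadratic LIS dynamic
-- program, and A's full-table Levenshtein fallback with a rolling-row one; objective: simpler, not faster.

-- ===== PORT A =====
-- 2D-table indexing helpers for A's dp table (indices are always in range in A; the defaults are for totality only)
def pvGet2 (t : List (List Int)) (i j : Int) : Int := PySem.List.pyGetD (PySem.List.pyGetD t i []) j 0
def pvSet2 (t : List (List Int)) (i j : Int) (v : Int) : List (List Int) :=
  PySem.List.pySetD t i (PySem.List.pySetD (PySem.List.pyGetD t i []) j v)

-- body of A's nested fill loop: one full inner pass 'for j in range(1, len_str2 + 1)' at row i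
def pvFillRow (cs1 : List Char) (cs2 : List Char) (t : List (List Int)) (i : Int) : List (List Int) :=
  (PySem.List.pyRange 1 ((cs2.length : Int) + 1) 1).foldl (fun t j =>
    let cost : Int := if PySem.List.pyGetD cs1 (i - 1) ' ' = PySem.List.pyGetD cs2 (j - 1) ' ' then 0 else 1
    pvSet2 t i j (min (min (pvGet2 t (i - 1) j + 1) (pvGet2 t i (j - 1) + 1)) (pvGet2 t (i - 1) (j - 1) + cost))) t

def levenshtein_distance (str1 : String) (str2 : String) : Int :=
  let cs1 := str1.toList
  let cs2 := str2.toList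
  let len1 : Int := cs1.length
  let len2 : Int := cs2.length
  -- dp = [[0] * (len_str2 + 1) for _ in range(len_str1 + 1)]
  let dp0 : List (List Int) :=
    (PySem.List.pyRange 0 (len1 + 1) 1).map (fun _ => PySem.List.pyRepeat [(0 : Int)] (len2 + 1))
  -- for i in range(len_str1 + 1): dp[i][0] = i
  let dp1 := (PySem.List.pyRange 0 (len1 + 1) 1).foldl (fun t i => pvSet2 t i 0 i) dp0
  -- for j in range(len_str2 + 1): dp[0][j] = j
  let dp2 := (PySem.List.pyRange 0 (len2 + 1) 1).foldl (fun t j => pvSet2 t 0 j j) dp1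
  -- for i in range(1, len_str1 + 1): for j in range(1, len_str2 + 1): …
  let dp3 := (PySem.List.pyRange 1 (len1 + 1) 1).foldl (pvFillRow cs1 cs2) dp2
  pvGet2 dp3 len1 len2

-- the manual binary search 'find_position' (while lo < hi)
def findPositionLoop (lst : List Int) (value : Int) (lo : Int) (hi : Int) : Int :=
  if h : lo < hi then
    let mid := PySem.Int.floordiv (lo + hi) 2
    if PySem.List.pyGetD lst mid 0 < value then findPositionLoop lst value (mid + 1) hi
    else findPositionLoop lst value lo mid
  else lo
termination_by (hi - lo).toNat
decreasing_by
  · have h2 := (PySem.Int.le_floordiv_iff_mul_le (a := lo + hi) (b := 2) (q := lo) (by norm_num)).mpr (by omega)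
    omega
  · have h2 := (PySem.Int.floordiv_lt_iff_lt_mul (a := lo + hi) (b := 2) (q := hi) (by norm_num)).mpr (by omega)
    omega

def find_position (lst : List Int) (value : Int) : Int := findPositionLoop lst value 0 (lst.length : Int)

-- body of A's patience loop 'for num in mapped_indices'
def pvLisStep (tl : List Int) (num : Int) : List Int :=
  let pos := find_position tl num
  if pos = (tl.length : Int) then tl ++ [num] else PySem.List.pySetD tl pos num

def ulam_distance (s1 : String) (s2 : String) : Int × Bool :=
  -- unequal lengths raise ValueError in Python: excluded by Pre_; the port's value there is arbitrary
  if PySem.Str.len s1 ≠ PySem.Str.len s2 then (0, true)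
  else if PySem.Set.equal (PySem.Set.ofList s1.toList) (PySem.Set.ofList s2.toList) = false then
    (levenshtein_distance s1 s2, true)
  else
    -- index_map = {char: idx for idx, char in enumerate(s2)}
    let index_map : PySem.Dict Char Int :=
      (PySem.List.enumerate s2.toList 0).foldl (fun d p => d.insert p.2 p.1) PySem.Dict.empty
    -- mapped_indices = [index_map[char] for char in s1]  (KeyError impossible: the char sets are equal)
    let mapped_indices := s1.toList.map (fun c => (index_map.get? c).getD 0)
    let lis_tails := mapped_indices.foldl pvLisStep ([] : List Int)
    (PySem.Str.len s1 - (lis_tails.length : Int), false)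

-- ===== PORT B =====
-- body of B's rolling-row loop: build row i from the previous row
def pvRowStep (cs1 : List Char) (cs2 : List Char) (prev : List Int) (i : Int) : List Int :=
  (PySem.List.pyRange 1 ((cs2.length : Int) + 1) 1).foldl (fun cur j =>
    let cost : Int := if PySem.List.pyGetD cs1 (i - 1) ' ' = PySem.List.pyGetD cs2 (j - 1) ' ' then 0 else 1
    cur ++ [min (min (PySem.List.pyGetD prev j 0 + 1) (PySem.List.pyGetD cur (j - 1) 0 + 1))
                (PySem.List.pyGetD prev (j - 1) 0 + cost)]) [i]

-- body of B's LIS loop: state (dp, best); inner scan for the best smaller predecessor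
def pvDpStep (a : List Int) (st : List Int × Int) (x : Int) : List Int × Int :=
  let dp := st.1
  let best := st.2
  let bestPrev := (PySem.List.pyRange 0 ((dp.length : Int)) 1).foldl (fun m j =>
    if PySem.List.pyGetD a j 0 < x ∧ m < PySem.List.pyGetD dp j 0
    then PySem.List.pyGetD dp j 0 else m) 0
  let d := bestPrev + 1
  (dp ++ [d], if best < d then d else best)

def ulam_distance_alt (s1 : String) (s2 : String) : Int × Bool :=
  if PySem.Str.len s1 ≠ PySem.Str.len s2 then (0, true)
  else if PySem.Set.equal (PySem.Set.ofList s1.toList) (PySem.Set.ofList s2.toList) = false then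
    -- rolling-row Levenshtein
    let cs1 := s1.toList
    let cs2 := s2.toList
    let len2 : Int := cs2.length
    let prev0 : List Int := PySem.List.pyRange 0 (len2 + 1) 1
    let prevN := (PySem.List.pyRange 1 ((cs1.length : Int) + 1) 1).foldl (pvRowStep cs1 cs2) prev0
    (PySem.List.pyGetD prevN len2 0, true)
  else
    let index_map : PySem.Dict Char Int :=
      (PySem.List.enumerate s2.toList 0).foldl (fun d p => d.insert p.2 p.1) PySem.Dict.empty
    let mapped_indices := s1.toList.map (fun c => (index_map.get? c).getD 0)
    -- classic quadratic LIS dynamic program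
    let st := mapped_indices.foldl (pvDpStep mapped_indices) (([] : List Int), (0 : Int))
    (PySem.Str.len s1 - st.2, false)

-- ===== PRECONDITION & SPEC =====
-- Pre_ excludes exactly the inputs of unequal length, on which Python A raises ValueError (B raises too).
def Pre_ulam_distance (s1 : String) (s2 : String) : Prop := PySem.Str.len s1 = PySem.Str.len s2
instance (s1 : String) (s2 : String) : Decidable (Pre_ulam_distance s1 s2) := by unfold Pre_ulam_distance; infer_instance
def pvWitness_ulam_distance : String × String := ("bca", "abc")

def Spec_ulam_distance (s1 : String) (s2 : String) (out : Int × Bool) : Prop := out = ulam_distance_alt s1 s2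
instance (s1 : String) (s2 : String) (out : Int × Bool) : Decidable (Spec_ulam_distance s1 s2 out) := by unfold Spec_ulam_distance; infer_instance

-- ===== CLAIM (what is proved, stated in full; the proofs are below) =====
def Claim_equal_ulam_distance : Prop := ∀ (s1 : String) (s2 : String), Dom_ulam_distance s1 s2 → Pre_ulam_distance s1 s2 → Spec_ulam_distance s1 s2 (ulam_distance s1 s2)

-- ===== LEMMAS AND PROOFS =====

-- ---- Levenshtein: A's full table equals B's rolling rows ----
-- generic getD facts
theorem pv_getD_set' {α : Type} (l : List α) (c k : Nat) (x d : α) (hc : c < l.length) :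
    (l.set c x).getD k d = if k = c then x else l.getD k d := by
  by_cases h : k = c
  · subst h; simp [List.getD_eq_getElem?_getD, hc]
  · simp [List.getD_eq_getElem?_getD, List.getElem?_set_ne (Ne.symm h), h]

theorem pv_getD_append' {α : Type} (l : List α) (x d : α) (k : Nat) :
    (l ++ [x]).getD k d = if k < l.length then l.getD k d else if k = l.length then x else d := by
  rcases lt_trichotomy k l.length with h | h | h
  · simp [List.getD_eq_getElem?_getD, List.getElem?_append_left h, h]
  · subst h; simp [List.getD_eq_getElem?_getD]
  · rw [List.getD_eq_getElem?_getD, List.getElem?_append_right (le_of_lt h),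
      List.getElem?_eq_none (by simp; omega)]
    simp [if_neg (by omega : ¬ k < l.length), if_neg (by omega : ¬ k = l.length)]

-- cast helpers and clean loop bodies
def pvCost (cs1 cs2 : List Char) (i j : Int) : Int :=
  if PySem.List.pyGetD cs1 (i - 1) ' ' = PySem.List.pyGetD cs2 (j - 1) ' ' then 0 else 1

theorem pvFillRow_eq (cs1 cs2 : List Char) (t : List (List Int)) (i : Int) :
    pvFillRow cs1 cs2 t i =
      (PySem.List.pyRange 1 ((cs2.length : Int) + 1) 1).foldl (fun t j =>
        pvSet2 t i j (min (min (pvGet2 t (i - 1) j + 1) (pvGet2 t i (j - 1) + 1))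
          (pvGet2 t (i - 1) (j - 1) + pvCost cs1 cs2 i j))) t := rfl

theorem pvGet2_natCast (t : List (List Int)) (p q : Nat) :
    pvGet2 t (p : Int) (q : Int) = (t.getD p []).getD q 0 := by
  simp [pvGet2]

theorem pvSet2_natCast (t : List (List Int)) (p : Nat) (j : Int) (v : Int) :
    pvSet2 t (p : Int) j v = t.set p (PySem.List.pySetD (t.getD p []) j v) := by
  simp [pvSet2]

-- partial inner row of B
def pvCur (cs1 cs2 : List Char) (prev : List Int) (i : Int) (jN : Nat) : List Int :=
  (PySem.List.pyRange 1 ((jN : Int) + 1) 1).foldl (fun cur j =>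
    cur ++ [min (min (PySem.List.pyGetD prev j 0 + 1) (PySem.List.pyGetD cur (j - 1) 0 + 1))
      (PySem.List.pyGetD prev (j - 1) 0 + pvCost cs1 cs2 i j)]) [i]

theorem pvCur_zero (cs1 cs2 : List Char) (prev : List Int) (i : Int) :
    pvCur cs1 cs2 prev i 0 = [i] := by
  unfold pvCur
  rw [PySem.List.pyRange_one_eq_nil (by norm_num)]
  rfl

theorem pvCur_succ (cs1 cs2 : List Char) (prev : List Int) (i : Int) (jN : Nat) :
    pvCur cs1 cs2 prev i (jN + 1) =
      pvCur cs1 cs2 prev i jN ++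
        [min (min (PySem.List.pyGetD prev ((jN : Int) + 1) 0 + 1)
          (PySem.List.pyGetD (pvCur cs1 cs2 prev i jN) ((jN : Int) + 1 - 1) 0 + 1))
          (PySem.List.pyGetD prev ((jN : Int) + 1 - 1) 0 + pvCost cs1 cs2 i ((jN : Int) + 1))] := by
  unfold pvCur
  have hcast : ((jN + 1 : Nat) : Int) + 1 = ((jN : Int) + 1) + 1 := by push_cast; ring
  rw [hcast, PySem.List.pyRange_one_succ_right (by omega), List.foldl_append]
  rfl

theorem pvCur_len (cs1 cs2 : List Char) (prev : List Int) (i : Int) (jN : Nat) :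
    (pvCur cs1 cs2 prev i jN).length = jN + 1 := by
  induction jN with
  | zero => rw [pvCur_zero]; rfl
  | succ jN ih => rw [pvCur_succ]; simp [ih]

theorem pvRowStep_eq_pvCur (cs1 cs2 : List Char) (prev : List Int) (i : Int) :
    pvRowStep cs1 cs2 prev i = pvCur cs1 cs2 prev i cs2.length := rfl

-- first init loop: dp[i][0] = i
theorem pv_fold_setcol (t0 : List (List Int)) (K : Nat) (hK : K ≤ t0.length) :
    ((PySem.List.pyRange 0 (K : Int) 1).foldl (fun t i => pvSet2 t i 0 i) t0).length = t0.length ∧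
    ∀ r : Nat, ((PySem.List.pyRange 0 (K : Int) 1).foldl (fun t i => pvSet2 t i 0 i) t0).getD r [] =
      if r < K then PySem.List.pySetD (t0.getD r []) 0 (r : Int) else t0.getD r [] := by
  induction K with
  | zero =>
    rw [PySem.List.pyRange_one_eq_nil (by norm_num)]
    simp
  | succ K ih =>
    obtain ⟨ihlen, ihget⟩ := ih (by omega)
    have hcast : ((K + 1 : Nat) : Int) = (K : Int) + 1 := by push_cast; ring
    rw [hcast, PySem.List.pyRange_one_succ_right (by positivity), List.foldl_append]
    simp only [List.foldl_cons, List.foldl_nil]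
    set T := (PySem.List.pyRange 0 (K : Int) 1).foldl (fun t i => pvSet2 t i 0 i) t0 with hT
    have hstep : pvSet2 T (K : Int) 0 (K : Int) = T.set K (PySem.List.pySetD (T.getD K []) 0 (K : Int)) :=
      pvSet2_natCast T K 0 (K : Int)
    have hKT : K < T.length := by omega
    have hrowK : T.getD K [] = t0.getD K [] := by
      rw [ihget K, if_neg (by omega)]
    rw [hrowK] at hstep
    rw [hstep]
    constructor
    · simp [ihlen]
    · intro r
      rw [pv_getD_set' T K r _ [] hKT, ihget r]
      by_cases hr : r = K
      · subst hr
        rw [if_pos rfl, if_pos (by omega)]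
      · rw [if_neg hr]
        by_cases h2 : r < K
        · rw [if_pos h2, if_pos (by omega)]
        · rw [if_neg h2, if_neg (by omega)]

-- second init loop on row 0: row[j] = j
theorem pv_fold_setj (row0 : List Int) (K : Nat) :
    ((PySem.List.pyRange 0 (K : Int) 1).foldl (fun row j => PySem.List.pySetD row j j) row0).length = row0.length ∧
    ∀ j : Nat, ((PySem.List.pyRange 0 (K : Int) 1).foldl (fun row j => PySem.List.pySetD row j j) row0).getD j 0 =
      if j < K ∧ j < row0.length then (j : Int) else row0.getD j 0 := by
  induction K with
  | zero =>
    rw [PySem.List.pyRange_one_eq_nil (by norm_num)]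
    simp
  | succ K ih =>
    obtain ⟨ihlen, ihget⟩ := ih
    have hcast : ((K + 1 : Nat) : Int) = (K : Int) + 1 := by push_cast; ring
    rw [hcast, PySem.List.pyRange_one_succ_right (by positivity), List.foldl_append]
    simp only [List.foldl_cons, List.foldl_nil]
    set R := (PySem.List.pyRange 0 (K : Int) 1).foldl (fun row j => PySem.List.pySetD row j j) row0 with hR
    rw [PySem.List.pySetD_natCast]
    constructor
    · simp [ihlen]
    · intro j
      by_cases hK : K < row0.length
      · rw [pv_getD_set' R K j _ 0 (by omega), ihget j]
        by_cases hj : j = K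
        · subst hj
          rw [if_pos rfl, if_pos ⟨by omega, hK⟩]
        · rw [if_neg hj]
          by_cases h2 : j < K ∧ j < row0.length
          · rw [if_pos h2, if_pos ⟨by omega, h2.2⟩]
          · rw [if_neg h2, if_neg (by omega)]
      · rw [List.set_eq_of_length_le (by omega), ihget j]
        by_cases h2 : j < K ∧ j < row0.length
        · rw [if_pos h2, if_pos ⟨by omega, h2.2⟩]
        · rw [if_neg h2, if_neg (by omega)]

-- the row-0 loop only touches row 0
theorem pv_fold_row0 (t0 : List (List Int)) (K : Nat) (h0 : 0 < t0.length) :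
    ((PySem.List.pyRange 0 (K : Int) 1).foldl (fun t j => pvSet2 t 0 j j) t0).length = t0.length ∧
    ((PySem.List.pyRange 0 (K : Int) 1).foldl (fun t j => pvSet2 t 0 j j) t0).getD 0 [] =
      (PySem.List.pyRange 0 (K : Int) 1).foldl (fun row j => PySem.List.pySetD row j j) (t0.getD 0 []) ∧
    ∀ r : Nat, r ≠ 0 → ((PySem.List.pyRange 0 (K : Int) 1).foldl (fun t j => pvSet2 t 0 j j) t0).getD r [] = t0.getD r [] := by
  induction K with
  | zero =>
    rw [PySem.List.pyRange_one_eq_nil (by norm_num)]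
    simp
  | succ K ih =>
    obtain ⟨ihlen, ihrow, ihother⟩ := ih
    have hcast : ((K + 1 : Nat) : Int) = (K : Int) + 1 := by push_cast; ring
    rw [hcast, PySem.List.pyRange_one_succ_right (by positivity), List.foldl_append, List.foldl_append]
    simp only [List.foldl_cons, List.foldl_nil]
    set T := (PySem.List.pyRange 0 (K : Int) 1).foldl (fun t j => pvSet2 t 0 j j) t0 with hT
    have hstep : pvSet2 T (((0:Nat)) : Int) ((K : Int)) ((K : Int)) =
        T.set 0 (PySem.List.pySetD (T.getD 0 []) (K : Int) (K : Int)) := pvSet2_natCast T 0 _ _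
    rw [show ((0:Int)) = (((0:Nat)):Int) from rfl] at *
    rw [hstep]
    refine ⟨by simp [ihlen], ?_, ?_⟩
    · rw [pv_getD_set' T 0 0 _ [] (by omega), if_pos rfl, ihrow]
    · intro r hr
      rw [pv_getD_set' T 0 r _ [] (by omega), if_neg hr, ihother r hr]

-- the fully initialized table
theorem pv_dp2_spec (cs1 cs2 : List Char) :
    (((PySem.List.pyRange 0 ((cs2.length : Int) + 1) 1).foldl (fun t j => pvSet2 t 0 j j)
      ((PySem.List.pyRange 0 ((cs1.length : Int) + 1) 1).foldl (fun t i => pvSet2 t i 0 i)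
        ((PySem.List.pyRange 0 ((cs1.length : Int) + 1) 1).map
          (fun _ => PySem.List.pyRepeat [(0 : Int)] ((cs2.length : Int) + 1))))).length = cs1.length + 1) ∧
    ∀ r : Nat, r ≤ cs1.length →
      ((PySem.List.pyRange 0 ((cs2.length : Int) + 1) 1).foldl (fun t j => pvSet2 t 0 j j)
        ((PySem.List.pyRange 0 ((cs1.length : Int) + 1) 1).foldl (fun t i => pvSet2 t i 0 i)
          ((PySem.List.pyRange 0 ((cs1.length : Int) + 1) 1).map
            (fun _ => PySem.List.pyRepeat [(0 : Int)] ((cs2.length : Int) + 1))))).getD r [] =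
        if r = 0 then PySem.List.pyRange 0 ((cs2.length : Int) + 1) 1
        else (r : Int) :: List.replicate cs2.length 0 := by
  set n := cs1.length with hn
  set m := cs2.length with hm
  have hc1 : ((n : Int) + 1) = ((n + 1 : Nat) : Int) := by push_cast; ring
  have hc2 : ((m : Int) + 1) = ((m + 1 : Nat) : Int) := by push_cast; ring
  set dp0 := (PySem.List.pyRange 0 ((n : Int) + 1) 1).map
    (fun _ => PySem.List.pyRepeat [(0 : Int)] ((m : Int) + 1)) with hdp0
  have hdp0len : dp0.length = n + 1 := by
    rw [hdp0]
    simp [PySem.List.length_pyRange_one]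
  have hdp0get : ∀ r : Nat, r < n + 1 → dp0.getD r [] = List.replicate (m + 1) (0 : Int) := by
    intro r hr
    rw [hdp0, List.getD_eq_getElem _ _ (by simpa [hdp0] using (by omega : r < dp0.length)), List.getElem_map]
    rw [PySem.List.pyRepeat_singleton]
    norm_num
  rw [hc1]
  obtain ⟨h1len, h1get⟩ := pv_fold_setcol dp0 (n + 1) (by omega)
  set dp1 := (PySem.List.pyRange 0 ((n + 1 : Nat) : Int) 1).foldl (fun t i => pvSet2 t i 0 i) dp0 with hdp1
  have hdp1get : ∀ r : Nat, r ≤ n → dp1.getD r [] = (r : Int) :: List.replicate m 0 := by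
    intro r hr
    rw [hdp1, h1get r, if_pos (by omega), hdp0get r (by omega)]
    rw [show ((0 : Int)) = (((0 : Nat)) : Int) from rfl, PySem.List.pySetD_natCast]
    simp [List.replicate_succ]
  rw [hc2]
  obtain ⟨h2len, h2row, h2other⟩ := pv_fold_row0 dp1 (m + 1) (by omega)
  constructor
  · rw [h2len, h1len, hdp0len]
  · intro r hr
    by_cases hr0 : r = 0
    · subst hr0
      rw [h2row, if_pos rfl]
      obtain ⟨hjlen, hjget⟩ := pv_fold_setj (dp1.getD 0 []) (m + 1)
      have hrow0 : dp1.getD 0 [] = (0 : Int) :: List.replicate m 0 := by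
        have := hdp1get 0 (by omega)
        simpa using this
      apply List.ext_getElem
      · rw [hjlen, hrow0]
        simp [PySem.List.length_pyRange_one]
      · intro i hi1 hi2
        have hilen : i < m + 1 := by
          rw [hjlen, hrow0] at hi1
          simpa using hi1
        rw [← List.getD_eq_getElem _ 0 hi1, hjget i, if_pos ⟨by omega, by rw [hrow0]; simp; omega⟩]
        rw [PySem.List.getElem_pyRange_one]
        simp
    · rw [h2other r hr0, if_neg hr0, hdp1get r hr]

-- one inner pass of A writes exactly B's next row into the table
theorem pv_fill_partial (cs1 cs2 : List Char) (prev : List Int) (iN : Nat) (t : List (List Int))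
    (hi : iN + 1 < t.length)
    (hprev : t.getD iN [] = prev)
    (hrow : t.getD (iN + 1) [] = ((iN : Int) + 1) :: List.replicate cs2.length 0) :
    ∀ jN : Nat, jN ≤ cs2.length →
      (((PySem.List.pyRange 1 ((jN : Int) + 1) 1).foldl (fun t j =>
          pvSet2 t ((iN : Int) + 1) j
            (min (min (pvGet2 t (((iN : Int) + 1) - 1) j + 1) (pvGet2 t ((iN : Int) + 1) (j - 1) + 1))
              (pvGet2 t (((iN : Int) + 1) - 1) (j - 1) + pvCost cs1 cs2 ((iN : Int) + 1) j))) t).length = t.length) ∧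
      (∀ r : Nat, r ≠ iN + 1 →
        ((PySem.List.pyRange 1 ((jN : Int) + 1) 1).foldl (fun t j =>
          pvSet2 t ((iN : Int) + 1) j
            (min (min (pvGet2 t (((iN : Int) + 1) - 1) j + 1) (pvGet2 t ((iN : Int) + 1) (j - 1) + 1))
              (pvGet2 t (((iN : Int) + 1) - 1) (j - 1) + pvCost cs1 cs2 ((iN : Int) + 1) j))) t).getD r [] = t.getD r []) ∧
      ((PySem.List.pyRange 1 ((jN : Int) + 1) 1).foldl (fun t j =>
          pvSet2 t ((iN : Int) + 1) j
            (min (min (pvGet2 t (((iN : Int) + 1) - 1) j + 1) (pvGet2 t ((iN : Int) + 1) (j - 1) + 1))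
              (pvGet2 t (((iN : Int) + 1) - 1) (j - 1) + pvCost cs1 cs2 ((iN : Int) + 1) j))) t).getD (iN + 1) [] =
        pvCur cs1 cs2 prev ((iN : Int) + 1) jN ++ List.replicate (cs2.length - jN) 0 := by
  set m := cs2.length with hm
  intro jN
  induction jN with
  | zero =>
    intro _
    rw [PySem.List.pyRange_one_eq_nil (by norm_num)]
    simp only [List.foldl_nil]
    refine ⟨by simp, by intro r hr; simp, ?_⟩
    rw [hrow, pvCur_zero]
    simp
  | succ jN ih =>
    intro hjN
    obtain ⟨ihlen, ihother, ihrow⟩ := ih (by omega)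
    have hcast : ((jN + 1 : Nat) : Int) + 1 = ((jN : Int) + 1) + 1 := by push_cast; ring
    rw [hcast, PySem.List.pyRange_one_succ_right (by omega), List.foldl_append]
    simp only [List.foldl_cons, List.foldl_nil]
    set T := (PySem.List.pyRange 1 ((jN : Int) + 1) 1).foldl (fun t j =>
      pvSet2 t ((iN : Int) + 1) j
        (min (min (pvGet2 t (((iN : Int) + 1) - 1) j + 1) (pvGet2 t ((iN : Int) + 1) (j - 1) + 1))
          (pvGet2 t (((iN : Int) + 1) - 1) (j - 1) + pvCost cs1 cs2 ((iN : Int) + 1) j))) t with hT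
    set cur := pvCur cs1 cs2 prev ((iN : Int) + 1) jN with hcur
    have hcurlen : cur.length = jN + 1 := pvCur_len cs1 cs2 prev _ jN
    -- the three reads
    have hsub1 : ((iN : Int) + 1) - 1 = ((iN : Nat) : Int) := by ring
    have hsub2 : ((jN : Int) + 1) - 1 = ((jN : Nat) : Int) := by ring
    have hjc : ((jN : Int) + 1) = ((jN + 1 : Nat) : Int) := by push_cast; ring
    have hic : ((iN : Int) + 1) = ((iN + 1 : Nat) : Int) := by push_cast; ring
    have hread1 : pvGet2 T (((iN : Int) + 1) - 1) ((jN : Int) + 1) = prev.getD (jN + 1) 0 := by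
      rw [hsub1, hjc, pvGet2_natCast, ihother iN (by omega), hprev]
    have hread2 : pvGet2 T ((iN : Int) + 1) (((jN : Int) + 1) - 1) = cur.getD jN 0 := by
      rw [hsub2, hic, pvGet2_natCast, ihrow, List.getD_append _ _ _ _ (by omega)]
    have hread3 : pvGet2 T (((iN : Int) + 1) - 1) (((jN : Int) + 1) - 1) = prev.getD jN 0 := by
      rw [hsub1, hsub2, pvGet2_natCast, ihother iN (by omega), hprev]
    rw [hread1, hread2, hread3]
    set v := min (min (prev.getD (jN + 1) 0 + 1) (cur.getD jN 0 + 1))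
      (prev.getD jN 0 + pvCost cs1 cs2 ((iN : Int) + 1) ((jN : Int) + 1)) with hv
    -- the write
    have hwrite : pvSet2 T ((iN : Int) + 1) ((jN : Int) + 1) v =
        T.set (iN + 1) ((cur ++ List.replicate (m - jN) 0).set (jN + 1) v) := by
      rw [hic, pvSet2_natCast, ihrow, hjc, PySem.List.pySetD_natCast]
    rw [hwrite]
    have hrowval : (cur ++ List.replicate (m - jN) 0).set (jN + 1) v =
        pvCur cs1 cs2 prev ((iN : Int) + 1) (jN + 1) ++ List.replicate (m - (jN + 1)) 0 := by
      rw [List.set_append, if_neg (by omega)]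
      have hrep : (List.replicate (m - jN) (0 : Int)).set (jN + 1 - cur.length) v =
          v :: List.replicate (m - (jN + 1)) 0 := by
        have : m - jN = (m - (jN + 1)) + 1 := by omega
        rw [this, List.replicate_succ, hcurlen]
        simp
      rw [hrep, pvCur_succ]
      have helem : min (min (PySem.List.pyGetD prev ((jN : Int) + 1) 0 + 1)
            (PySem.List.pyGetD (pvCur cs1 cs2 prev ((iN : Int) + 1) jN) ((jN : Int) + 1 - 1) 0 + 1))
            (PySem.List.pyGetD prev ((jN : Int) + 1 - 1) 0 + pvCost cs1 cs2 ((iN : Int) + 1) ((jN : Int) + 1)) = v := by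
        rw [hv, hsub2, hjc]
        simp only [PySem.List.pyGetD_natCast]
        rw [← hcur]
      rw [helem, ← hcur]
      simp
    rw [hrowval]
    have hTlen : (iN + 1) < T.length := by omega
    refine ⟨by simp [ihlen], ?_, ?_⟩
    · intro r hr
      rw [pv_getD_set' T (iN + 1) r _ [] hTlen, if_neg hr, ihother r hr]
    · rw [pv_getD_set' T (iN + 1) (iN + 1) _ [] hTlen, if_pos rfl]

-- B's row chain
def pvPrev (cs1 cs2 : List Char) (iN : Nat) : List Int :=
  (PySem.List.pyRange 1 ((iN : Int) + 1) 1).foldl (pvRowStep cs1 cs2)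
    (PySem.List.pyRange 0 ((cs2.length : Int) + 1) 1)

theorem pvPrev_zero (cs1 cs2 : List Char) :
    pvPrev cs1 cs2 0 = PySem.List.pyRange 0 ((cs2.length : Int) + 1) 1 := by
  unfold pvPrev
  rw [PySem.List.pyRange_one_eq_nil (a := 1) (b := (((0 : Nat) : Int)) + 1) (by norm_num)]
  rfl

theorem pvPrev_succ (cs1 cs2 : List Char) (iN : Nat) :
    pvPrev cs1 cs2 (iN + 1) = pvRowStep cs1 cs2 (pvPrev cs1 cs2 iN) ((iN : Int) + 1) := by
  unfold pvPrev
  have hcast : ((iN + 1 : Nat) : Int) + 1 = ((iN : Int) + 1) + 1 := by push_cast; ring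
  rw [hcast, PySem.List.pyRange_one_succ_right (a := 1) (b := (iN : Int) + 1) (by omega), List.foldl_append]
  rfl

-- the table after the first iN outer iterations
theorem pv_table (cs1 cs2 : List Char) : ∀ iN : Nat, iN ≤ cs1.length →
    (((PySem.List.pyRange 1 ((iN : Int) + 1) 1).foldl (pvFillRow cs1 cs2)
      ((PySem.List.pyRange 0 ((cs2.length : Int) + 1) 1).foldl (fun t j => pvSet2 t 0 j j)
        ((PySem.List.pyRange 0 ((cs1.length : Int) + 1) 1).foldl (fun t i => pvSet2 t i 0 i)
          ((PySem.List.pyRange 0 ((cs1.length : Int) + 1) 1).map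
            (fun _ => PySem.List.pyRepeat [(0 : Int)] ((cs2.length : Int) + 1)))))).length = cs1.length + 1) ∧
    (∀ r : Nat, r ≤ iN →
      ((PySem.List.pyRange 1 ((iN : Int) + 1) 1).foldl (pvFillRow cs1 cs2)
        ((PySem.List.pyRange 0 ((cs2.length : Int) + 1) 1).foldl (fun t j => pvSet2 t 0 j j)
          ((PySem.List.pyRange 0 ((cs1.length : Int) + 1) 1).foldl (fun t i => pvSet2 t i 0 i)
            ((PySem.List.pyRange 0 ((cs1.length : Int) + 1) 1).map
              (fun _ => PySem.List.pyRepeat [(0 : Int)] ((cs2.length : Int) + 1)))))).getD r [] =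
        pvPrev cs1 cs2 r) ∧
    (∀ r : Nat, iN < r → r ≤ cs1.length →
      ((PySem.List.pyRange 1 ((iN : Int) + 1) 1).foldl (pvFillRow cs1 cs2)
        ((PySem.List.pyRange 0 ((cs2.length : Int) + 1) 1).foldl (fun t j => pvSet2 t 0 j j)
          ((PySem.List.pyRange 0 ((cs1.length : Int) + 1) 1).foldl (fun t i => pvSet2 t i 0 i)
            ((PySem.List.pyRange 0 ((cs1.length : Int) + 1) 1).map
              (fun _ => PySem.List.pyRepeat [(0 : Int)] ((cs2.length : Int) + 1)))))).getD r [] =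
        (r : Int) :: List.replicate cs2.length 0) := by
  obtain ⟨hd2len, hd2get⟩ := pv_dp2_spec cs1 cs2
  intro iN
  induction iN with
  | zero =>
    intro _
    rw [PySem.List.pyRange_one_eq_nil (a := 1) (b := (((0 : Nat) : Int)) + 1) (by norm_num)]
    simp only [List.foldl_nil]
    refine ⟨hd2len, ?_, ?_⟩
    · intro r hr
      have hr0 : r = 0 := by omega
      subst hr0
      rw [hd2get 0 (by omega), if_pos rfl, pvPrev_zero]
    · intro r hr1 hr2
      rw [hd2get r hr2, if_neg (by omega)]
  | succ iN ih =>
    intro hiN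
    obtain ⟨ihlen, ihdone, ihinit⟩ := ih (by omega)
    have hcast : ((iN + 1 : Nat) : Int) + 1 = ((iN : Int) + 1) + 1 := by push_cast; ring
    rw [hcast, PySem.List.pyRange_one_succ_right (a := 1) (b := (iN : Int) + 1) (by omega), List.foldl_append]
    simp only [List.foldl_cons, List.foldl_nil]
    rw [pvFillRow_eq]
    have hic : ((iN + 1 : Nat) : Int) = (iN : Int) + 1 := by push_cast; ring
    have hrow : (((PySem.List.pyRange 1 ((iN : Int) + 1) 1).foldl (pvFillRow cs1 cs2)
        ((PySem.List.pyRange 0 ((cs2.length : Int) + 1) 1).foldl (fun t j => pvSet2 t 0 j j)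
          ((PySem.List.pyRange 0 ((cs1.length : Int) + 1) 1).foldl (fun t i => pvSet2 t i 0 i)
            ((PySem.List.pyRange 0 ((cs1.length : Int) + 1) 1).map
              (fun _ => PySem.List.pyRepeat [(0 : Int)] ((cs2.length : Int) + 1))))))).getD (iN + 1) [] =
        ((iN : Int) + 1) :: List.replicate cs2.length 0 := by
      rw [ihinit (iN + 1) (by omega) (by omega), hic]
    obtain ⟨flen, fother, frow⟩ :=
      pv_fill_partial cs1 cs2 (pvPrev cs1 cs2 iN) iN _
        (by omega) (ihdone iN (by omega)) hrow cs2.length (le_refl _)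
    refine ⟨by rw [flen, ihlen], ?_, ?_⟩
    · intro r hr
      rcases Nat.lt_or_ge r (iN + 1) with h | h
      · rw [fother r (by omega), ihdone r (by omega)]
      · have : r = iN + 1 := by omega
        subst this
        rw [frow, pvPrev_succ, pvRowStep_eq_pvCur]
        simp
    · intro r hr1 hr2
      rw [fother r (by omega), ihinit r (by omega) hr2]

-- A's full-table Levenshtein equals B's rolling rows
theorem pv_lev_eq (s1 s2 : String) :
    levenshtein_distance s1 s2 =
      PySem.List.pyGetD
        ((PySem.List.pyRange 1 ((s1.toList.length : Int) + 1) 1).foldl (pvRowStep s1.toList s2.toList)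
          (PySem.List.pyRange 0 ((s2.toList.length : Int) + 1) 1))
        ((s2.toList.length : Int)) 0 := by
  obtain ⟨hlen, hdone, _⟩ := pv_table s1.toList s2.toList s1.toList.length (le_refl _)
  show pvGet2
      ((PySem.List.pyRange 1 ((s1.toList.length : Int) + 1) 1).foldl (pvFillRow s1.toList s2.toList)
        ((PySem.List.pyRange 0 ((s2.toList.length : Int) + 1) 1).foldl (fun t j => pvSet2 t 0 j j)
          ((PySem.List.pyRange 0 ((s1.toList.length : Int) + 1) 1).foldl (fun t i => pvSet2 t i 0 i)
            ((PySem.List.pyRange 0 ((s1.toList.length : Int) + 1) 1).map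
              (fun _ => PySem.List.pyRepeat [(0 : Int)] ((s2.toList.length : Int) + 1))))))
      ((s1.toList.length : Int)) ((s2.toList.length : Int)) = _
  rw [pvGet2_natCast, hdone s1.toList.length (le_refl _), PySem.List.pyGetD_natCast]
  rfl


-- ---- LIS: patience tails length equals the quadratic DP's best ----
-- getD facts

theorem pv_pairwise_getD {tl : List Int} (hs : tl.Pairwise (· < ·)) {p q : Nat}
    (hpq : p < q) (hq : q < tl.length) : tl.getD p 0 < tl.getD q 0 := by
  have h := List.pairwise_iff_getElem.mp hs p q (by omega) hq hpq
  rwa [List.getD_eq_getElem _ _ (by omega), List.getD_eq_getElem _ _ hq]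

-- inner max-scan characterization
theorem pv_innerMax (a dp : List Int) (x : Int) (L : Nat) :
    0 ≤ ((PySem.List.pyRange 0 (L : Int) 1).foldl (fun m j =>
        if PySem.List.pyGetD a j 0 < x ∧ m < PySem.List.pyGetD dp j 0
        then PySem.List.pyGetD dp j 0 else m) 0) ∧
      (∀ j : Nat, j < L → a.getD j 0 < x → dp.getD j 0 ≤
        ((PySem.List.pyRange 0 (L : Int) 1).foldl (fun m j =>
          if PySem.List.pyGetD a j 0 < x ∧ m < PySem.List.pyGetD dp j 0
          then PySem.List.pyGetD dp j 0 else m) 0)) ∧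
      (((PySem.List.pyRange 0 (L : Int) 1).foldl (fun m j =>
          if PySem.List.pyGetD a j 0 < x ∧ m < PySem.List.pyGetD dp j 0
          then PySem.List.pyGetD dp j 0 else m) 0) = 0 ∨
        ∃ j : Nat, j < L ∧ a.getD j 0 < x ∧ dp.getD j 0 =
          ((PySem.List.pyRange 0 (L : Int) 1).foldl (fun m j =>
            if PySem.List.pyGetD a j 0 < x ∧ m < PySem.List.pyGetD dp j 0
            then PySem.List.pyGetD dp j 0 else m) 0)) := by
  induction L with
  | zero => simp [PySem.List.pyRange_one_eq_nil]
  | succ L ih =>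
    have hcast : ((L + 1 : Nat) : Int) = (L : Int) + 1 := by push_cast; ring
    rw [hcast, PySem.List.pyRange_one_succ_right (by positivity), List.foldl_append]
    simp only [List.foldl_cons, List.foldl_nil]
    obtain ⟨ih0, ihmax, ihwit⟩ := ih
    set F := (PySem.List.pyRange 0 (L : Int) 1).foldl (fun m j =>
      if PySem.List.pyGetD a j 0 < x ∧ m < PySem.List.pyGetD dp j 0
      then PySem.List.pyGetD dp j 0 else m) 0 with hF
    by_cases hc : a.getD L 0 < x ∧ F < dp.getD L 0
    · rw [if_pos (by simpa using hc)]
      simp only [PySem.List.pyGetD_natCast]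
      refine ⟨by omega, ?_, Or.inr ⟨L, by omega, hc.1, rfl⟩⟩
      intro j hj hja
      rcases Nat.lt_or_ge j L with h | h
      · exact le_trans (ihmax j h hja) (le_of_lt hc.2)
      · have : j = L := by omega
        subst this; exact le_refl _
    · rw [if_neg (by simpa using hc)]
      refine ⟨ih0, ?_, ?_⟩
      · intro j hj hja
        rcases Nat.lt_or_ge j L with h | h
        · exact ihmax j h hja
        · have : j = L := by omega
          subst this
          rcases Classical.em (a.getD j 0 < x) with _ | hx
          · omega
          · exact absurd hja hx
      · rcases ihwit with h | ⟨j, hj, hja, hdj⟩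
        · exact Or.inl h
        · exact Or.inr ⟨j, by omega, hja, hdj⟩

theorem pv_findPos_unfold (lst : List Int) (v lo hi : Int) (h : lo < hi) :
    findPositionLoop lst v lo hi =
      if PySem.List.pyGetD lst (PySem.Int.floordiv (lo + hi) 2) 0 < v
      then findPositionLoop lst v (PySem.Int.floordiv (lo + hi) 2 + 1) hi
      else findPositionLoop lst v lo (PySem.Int.floordiv (lo + hi) 2) := by
  rw [findPositionLoop]
  simp [h]

theorem pv_findPos_base (lst : List Int) (v lo hi : Int) (h : ¬ lo < hi) :
    findPositionLoop lst v lo hi = lo := by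
  rw [findPositionLoop]
  simp [h]

theorem pv_findPos_aux (tl : List Int) (x : Int) (hs : tl.Pairwise (· < ·)) :
    ∀ (fuel lo hi : Nat), hi - lo ≤ fuel → lo ≤ hi → hi ≤ tl.length →
    (∀ k, k < lo → tl.getD k 0 < x) → (∀ k, hi ≤ k → k < tl.length → x ≤ tl.getD k 0) →
    ∃ c : Nat, findPositionLoop tl x lo hi = (c : Int) ∧ lo ≤ c ∧ c ≤ hi ∧
      (∀ k, k < c → tl.getD k 0 < x) ∧ (∀ k, c ≤ k → k < tl.length → x ≤ tl.getD k 0) := by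
  intro fuel
  induction fuel with
  | zero =>
    intro lo hi hfuel hlh hhi hlow hhigh
    have : lo = hi := by omega
    subst this
    exact ⟨lo, pv_findPos_base tl x _ _ (by omega), le_refl _, le_refl _, hlow, hhigh⟩
  | succ fuel ih =>
    intro lo hi hfuel hlh hhi hlow hhigh
    rcases Nat.eq_or_lt_of_le hlh with heq | hlt
    · subst heq
      exact ⟨lo, pv_findPos_base tl x _ _ (by omega), le_refl _, le_refl _, hlow, hhigh⟩
    · have hcast : ((lo : Int) + (hi : Int)) = ((lo + hi : Nat) : Int) := by push_cast; ring
      have hfd : PySem.Int.floordiv ((lo : Int) + (hi : Int)) 2 = (((lo + hi) / 2 : Nat) : Int) := by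
        rw [hcast]; exact_mod_cast PySem.Int.floordiv_natCast (lo + hi) 2
      rw [pv_findPos_unfold tl x _ _ (by exact_mod_cast hlt)]
      simp only [hfd, PySem.List.pyGetD_natCast]
      set midN := (lo + hi) / 2 with hmid
      have hmlo : lo ≤ midN := by omega
      have hmhi : midN < hi := by omega
      by_cases hb : tl.getD midN 0 < x
      · rw [if_pos hb]
        have hlow' : ∀ k, k < midN + 1 → tl.getD k 0 < x := by
          intro k hk
          rcases Nat.lt_or_ge k lo with h | h
          · exact hlow k h
          · rcases Nat.lt_or_ge k midN with h2 | h2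
            · exact lt_trans (pv_pairwise_getD hs h2 (by omega)) hb
            · have : k = midN := by omega
              subst this; exact hb
        obtain ⟨c, hcE, hc1, hc2, hc3, hc4⟩ := ih (midN + 1) hi (by omega) (by omega) hhi hlow' hhigh
        have hc : ((midN : Int) + 1) = ((midN + 1 : Nat) : Int) := by push_cast; ring
        rw [hc]
        exact ⟨c, hcE, by omega, hc2, hc3, hc4⟩
      · rw [if_neg hb]
        have hhigh' : ∀ k, midN ≤ k → k < tl.length → x ≤ tl.getD k 0 := by
          intro k hk hkl
          rcases Nat.lt_or_ge k hi with h | h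
          · rcases Nat.eq_or_lt_of_le hk with h2 | h2
            · subst h2; omega
            · have : tl.getD midN 0 < tl.getD k 0 := pv_pairwise_getD hs h2 hkl
              omega
          · exact hhigh k h hkl
        obtain ⟨c, hcE, hc1, hc2, hc3, hc4⟩ := ih lo midN (by omega) (by omega) (by omega) hlow hhigh'
        exact ⟨c, hcE, hc1, by omega, hc3, hc4⟩

theorem pvLisStep_eq (tl : List Int) (num : Int) :
    pvLisStep tl num =
      if findPositionLoop tl num 0 (tl.length : Int) = (tl.length : Int) then tl ++ [num]
      else PySem.List.pySetD tl (findPositionLoop tl num 0 (tl.length : Int)) num := rfl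

def pvTails (a : List Int) (t : Nat) : List Int := (a.take t).foldl pvLisStep []
def pvSt (a : List Int) (t : Nat) : List Int × Int := (a.take t).foldl (pvDpStep a) ([], 0)

def pvInv (a : List Int) (t : Nat) : Prop :=
  (pvSt a t).1.length = t ∧
  List.Pairwise (· < ·) (pvTails a t) ∧
  ((pvTails a t).length : Int) = (pvSt a t).2 ∧
  (∀ k : Nat, k < (pvTails a t).length →
    (∀ j : Nat, j < t → (pvSt a t).1.getD j 0 = (k : Int) + 1 → (pvTails a t).getD k 0 ≤ a.getD j 0) ∧
    (∃ j : Nat, j < t ∧ (pvSt a t).1.getD j 0 = (k : Int) + 1 ∧ a.getD j 0 = (pvTails a t).getD k 0)) ∧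
  (∀ j : Nat, j < t → ∃ k : Nat, k < (pvTails a t).length ∧ (pvSt a t).1.getD j 0 = (k : Int) + 1)

theorem pvInv_zero (a : List Int) : pvInv a 0 := by
  unfold pvInv pvTails pvSt
  simp

theorem pvInv_succ (a : List Int) (t : Nat) (h : t < a.length) (ih : pvInv a t) :
    pvInv a (t + 1) := by
  obtain ⟨hlen, hs, hbest, hmin, hrange⟩ := ih
  set x := a.getD t 0 with hx
  set tl := pvTails a t with htl
  set dp := (pvSt a t).1 with hdp
  set best := (pvSt a t).2 with hbst
  have htake : a.take (t+1) = a.take t ++ [x] := by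
    rw [List.take_add_one]
    simp [hx, List.getElem?_eq_getElem h]
  have hT : pvTails a (t+1) = pvLisStep tl x := by
    unfold pvTails
    rw [htake, List.foldl_append]
    rfl
  have hS : pvSt a (t+1) = pvDpStep a (pvSt a t) x := by
    unfold pvSt
    rw [htake, List.foldl_append]
    rfl
  -- inner max characterization
  set F := (PySem.List.pyRange 0 ((dp.length : Int)) 1).foldl (fun m j =>
    if PySem.List.pyGetD a j 0 < x ∧ m < PySem.List.pyGetD dp j 0
    then PySem.List.pyGetD dp j 0 else m) 0 with hF
  obtain ⟨hF0, hFmax, hFwit⟩ := pv_innerMax a dp x dp.length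
  have hSval : pvSt a (t+1) = (dp ++ [F + 1], if best < F + 1 then F + 1 else best) := by
    rw [hS]; rfl
  -- binary search result
  obtain ⟨c, hcE, _, hc2, hc3, hc4⟩ :=
    pv_findPos_aux tl x hs tl.length 0 tl.length (by omega) (by omega) (le_refl _)
      (by omega) (fun k hk hkl => by omega)
  have hcE0 : findPositionLoop tl x 0 (tl.length : Int) = (c : Int) := by exact_mod_cast hcE
  -- c = F
  have hcF : (c : Int) = F := by
    have hFc : F ≤ (c : Int) := by
      rcases hFwit with h0 | ⟨j, hj, hja, hdj⟩
      · omega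
      · obtain ⟨k, hk, hdk⟩ := hrange j (by omega)
        have hkc : k < c := by
          by_contra hkc
          push Not at hkc
          have hcl : c < tl.length := by omega
          have h1 : x ≤ tl.getD c 0 := hc4 c (le_refl _) hcl
          have h2 : tl.getD c 0 ≤ tl.getD k 0 := by
            rcases Nat.eq_or_lt_of_le hkc with he | hl
            · rw [he]
            · exact le_of_lt (pv_pairwise_getD hs hl hk)
          have h3 : tl.getD k 0 ≤ a.getD j 0 := (hmin k hk).1 j (by omega) hdk
          omega
        omega
    have hcF' : (c : Int) ≤ F := by
      rcases Nat.eq_zero_or_pos c with h0 | hpos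
      · omega
      · have hk : c - 1 < tl.length := by omega
        have h1 : tl.getD (c-1) 0 < x := hc3 (c-1) (by omega)
        obtain ⟨j, hj, hdj, haj⟩ := (hmin (c-1) hk).2
        have := hFmax j (by omega) (by omega)
        have hcast : ((c - 1 : Nat) : Int) = (c : Int) - 1 := by
          have : (1:Nat) ≤ c := hpos
          push_cast [this]
          ring
        omega
    omega
  have hd : F + 1 = (c : Int) + 1 := by omega
  by_cases hcase : c = tl.length
  · -- append case
    have hTval : pvTails a (t+1) = tl ++ [x] := by
      rw [hT, pvLisStep_eq, hcE0, if_pos (by exact_mod_cast congrArg (Nat.cast : Nat → Int) hcase)]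
    have hbestval : (if best < F + 1 then F + 1 else best) = F + 1 := by
      rw [if_pos (by omega)]
    refine ⟨?_, ?_, ?_, ?_, ?_⟩
    · rw [hSval]; simp [hlen]
    · rw [hTval]
      rw [List.pairwise_append]
      refine ⟨hs, List.pairwise_singleton _ _, ?_⟩
      intro u hu v hv
      simp at hv
      subst hv
      obtain ⟨p, hp, hpu⟩ := List.mem_iff_getElem.mp hu
      rw [← List.getD_eq_getElem tl 0 hp] at hpu
      rw [← hpu]
      exact hc3 p (by omega)
    · rw [hSval, hTval]
      simp only [List.length_append, List.length_singleton]
      rw [hbestval]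
      push_cast
      omega
    · intro k hk
      rw [hTval] at hk
      simp only [List.length_append, List.length_singleton] at hk
      rw [hSval, hTval]
      simp only
      rcases Nat.lt_or_ge k tl.length with hklt | hkge
      · -- old k
        constructor
        · intro j hj hdj
          rw [pv_getD_append' tl x 0 k, if_pos hklt]
          rcases Nat.lt_or_ge j t with hjt | hjt
          · rw [pv_getD_append' dp (F+1) 0 j, if_pos (by omega)] at hdj
            exact (hmin k hklt).1 j hjt hdj
          · have hjteq : j = t := by omega
            subst hjteq
            rw [pv_getD_append' dp (F+1) 0 j, if_neg (by omega), if_pos (by omega)] at hdj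
            -- F + 1 = k + 1 with k < tl.length = c: contradiction
            omega
        · obtain ⟨j, hj, hdj, haj⟩ := (hmin k hklt).2
          exact ⟨j, by omega, by rw [pv_getD_append' dp (F+1) 0 j, if_pos (by omega)]; exact hdj,
            by rw [pv_getD_append' tl x 0 k, if_pos hklt]; exact haj⟩
      · -- k = tl.length: the new element
        have hkeq : k = tl.length := by omega
        subst hkeq
        constructor
        · intro j hj hdj
          rw [pv_getD_append' tl x 0 tl.length, if_neg (by omega), if_pos rfl]
          rcases Nat.lt_or_ge j t with hjt | hjt
          · rw [pv_getD_append' dp (F+1) 0 j, if_pos (by omega)] at hdj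
            obtain ⟨k', hk', hdk'⟩ := hrange j hjt
            omega
          · have hjteq : j = t := by omega
            exact le_of_eq (by rw [hjteq])
        · refine ⟨t, by omega, ?_, ?_⟩
          · rw [pv_getD_append' dp (F+1) 0 t, if_neg (by omega), if_pos (by omega)]
            omega
          · rw [pv_getD_append' tl x 0 tl.length, if_neg (by omega), if_pos rfl]
    · intro j hj
      rw [hSval, hTval]
      simp only [List.length_append, List.length_singleton]
      rcases Nat.lt_or_ge j t with hjt | hjt
      · obtain ⟨k, hk, hdk⟩ := hrange j hjt
        exact ⟨k, by omega, by rw [pv_getD_append' dp (F+1) 0 j, if_pos (by omega)]; exact hdk⟩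
      · have hjteq : j = t := by omega
        rw [hjteq]
        refine ⟨tl.length, by omega, ?_⟩
        rw [pv_getD_append' dp (F+1) 0 t, if_neg (by omega), if_pos (by omega)]
        omega
  · -- replace case: c < tl.length
    have hclt : c < tl.length := by omega
    have hTval : pvTails a (t+1) = tl.set c x := by
      rw [hT, pvLisStep_eq, hcE0, if_neg (by exact_mod_cast fun hh => hcase (by exact_mod_cast hh))]
      exact PySem.List.pySetD_natCast tl c x
    have hxc : x ≤ tl.getD c 0 := hc4 c (le_refl _) hclt
    have hbestval : (if best < F + 1 then F + 1 else best) = best := by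
      rw [if_neg (by omega)]
    refine ⟨?_, ?_, ?_, ?_, ?_⟩
    · rw [hSval]; simp [hlen]
    · rw [hTval]
      rw [List.pairwise_iff_getElem]
      intro p q hp hq hpq
      simp only [List.length_set] at hp hq
      rw [List.getElem_set, List.getElem_set]
      have hgd : ∀ (r : Nat) (hr : r < tl.length), tl[r] = tl.getD r 0 :=
        fun r hr => (List.getD_eq_getElem tl 0 hr).symm
      by_cases hpc : c = p
      · subst hpc
        rw [if_pos rfl, if_neg (by omega)]
        rw [hgd q hq]
        calc x ≤ tl.getD c 0 := hxc
          _ < tl.getD q 0 := pv_pairwise_getD hs hpq hq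
      · rw [if_neg hpc]
        by_cases hqc : c = q
        · subst hqc
          rw [if_pos rfl, hgd p hp]
          exact hc3 p (by omega)
        · rw [if_neg hqc, hgd p hp, hgd q hq]
          exact pv_pairwise_getD hs hpq hq
    · rw [hSval, hTval]
      simp only [List.length_set]
      rw [hbestval]
      exact hbest
    · intro k hk
      rw [hTval] at hk
      simp only [List.length_set] at hk
      rw [hSval, hTval]
      simp only
      by_cases hkc : k = c
      · constructor
        · intro j hj hdj
          rw [pv_getD_set' tl c k x 0 hclt, if_pos hkc]
          rcases Nat.lt_or_ge j t with hjt | hjt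
          · rw [pv_getD_append' dp (F+1) 0 j, if_pos (by omega)] at hdj
            rw [hkc] at hdj
            have h1 : tl.getD c 0 ≤ a.getD j 0 := (hmin c hclt).1 j hjt hdj
            omega
          · have hjteq : j = t := by omega
            exact le_of_eq (by rw [hjteq])
        · refine ⟨t, by omega, ?_, ?_⟩
          · rw [pv_getD_append' dp (F+1) 0 t, if_neg (by omega), if_pos (by omega)]
            rw [hkc]
            omega
          · rw [pv_getD_set' tl c k x 0 hclt, if_pos hkc]
      · constructor
        · intro j hj hdj
          rw [pv_getD_set' tl c k x 0 hclt, if_neg hkc]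
          rcases Nat.lt_or_ge j t with hjt | hjt
          · rw [pv_getD_append' dp (F+1) 0 j, if_pos (by omega)] at hdj
            exact (hmin k hk).1 j hjt hdj
          · rw [pv_getD_append' dp (F+1) 0 j, if_neg (by omega), if_pos (by omega)] at hdj
            omega
        · obtain ⟨j, hj, hdj, haj⟩ := (hmin k hk).2
          exact ⟨j, by omega, by rw [pv_getD_append' dp (F+1) 0 j, if_pos (by omega)]; exact hdj,
            by rw [pv_getD_set' tl c k x 0 hclt, if_neg hkc]; exact haj⟩
    · intro j hj
      rw [hSval, hTval]
      simp only [List.length_set]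
      rcases Nat.lt_or_ge j t with hjt | hjt
      · obtain ⟨k, hk, hdk⟩ := hrange j hjt
        exact ⟨k, hk, by rw [pv_getD_append' dp (F+1) 0 j, if_pos (by omega)]; exact hdk⟩
      · have hjteq : j = t := by omega
        rw [hjteq]
        exact ⟨c, hclt, by rw [pv_getD_append' dp (F+1) 0 t, if_neg (by omega), if_pos (by omega)]; omega⟩

theorem pv_lis_eq (a : List Int) :
    ((a.foldl pvLisStep ([] : List Int)).length : Int) =
      (a.foldl (pvDpStep a) (([] : List Int), (0 : Int))).2 := by
  have hinv : ∀ t : Nat, t ≤ a.length → pvInv a t := by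
    intro t
    induction t with
    | zero => intro _; exact pvInv_zero a
    | succ t ih => intro ht; exact pvInv_succ a t (by omega) (ih (by omega))
  have := (hinv a.length (le_refl _)).2.2.1
  unfold pvTails pvSt at this
  rwa [List.take_length] at this

-- ===== VERDICT (by name: the statement is the Claim_ definition above) =====
theorem ulam_distance_spec : Claim_equal_ulam_distance := by
  intro s1 s2 _ hpre
  unfold Pre_ulam_distance at hpre
  unfold Spec_ulam_distance ulam_distance ulam_distance_alt
  simp only [if_neg (show ¬ PySem.Str.len s1 ≠ PySem.Str.len s2 from fun hne => hne hpre)]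
  by_cases hset : PySem.Set.equal (PySem.Set.ofList s1.toList) (PySem.Set.ofList s2.toList) = false
  · simp only [if_pos hset]
    exact congrArg (fun z => (z, true)) (pv_lev_eq s1 s2)
  · simp only [if_neg hset]
    exact congrArg (fun z => (PySem.Str.len s1 - z, false)) (pv_lis_eq _)
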